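-- pv_equiv track=rewrite | github.com/MrClue/DMAD-Python-Algorithms | Binary Search Trees/BST_nodes_height_combinations.py | countOfBST
-- ===== SOURCE A (Python) =====
-- dp = [[-1 for _ in range(105)] for _ in range(105)]
--
-- mod = 1000000007
--
-- def countOfBST(N, H):
--
-- 		# Base Case1 : If N == 0, return
-- 		# 1 as a valid BST has been formed
-- 	if (N == 0):
-- 		return 1
--
-- 		# Base Case2 : If H == 0, return true
-- 		# if N == 1
-- 	if (H == 0):
-- 		return N == 1
--
-- 		# If the current state has already
-- 		# been computed, then return it.
-- 	if (dp[N][H] != -1):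
-- 		return dp[N][H]
--
-- 		# Initialize answer to 0.
-- 	ans = 0
--
-- 	# Iterate over all numbers from
-- 	# [1, N], with 'i' as root.
-- 	for i in range(1, N+1):
--
-- 				# Call the recursive functions to
-- 				# find count of BST of left and right
-- 				# subtrees. Add the product of
-- 				# both terms to the answer.
-- 		ans += (countOfBST(i - 1, H - 1) * countOfBST(N - i, H - 1)) % mod
--
-- 		# Take modulo 1000000007
-- 		ans %= mod
--
-- 		# Return ans
-- 	dp[N][H] = ans
-- 	return dp[N][H]
-- ===== SOURCE B (Python) =====
-- # Bottom-up tabulation by height: row(h) holds the counts for 0..N nodes under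
-- # height limit h; built row by row instead of A's memoized (N,H)-cell recursion.
-- def countOfBST(N, H):
--     if N == 0:
--         return 1
--     if H == 0:
--         return N == 1
--     mod = 1000000007
--     def row(h):
--         if h == 0:
--             return [1, 1] + [0] * (N - 1)
--         prev = row(h - 1)
--         return [1] + [
--             sum(prev[i - 1] * prev[n - i] for i in range(1, n + 1)) % mod
--             for n in range(1, N + 1)
--         ]
--     return row(H)[N]
-- ===== Notes on version B (the rewrite author's own statement) =====
-- stated objective: alternative
-- what changed: Replaces A's top-down memoized recursion over a global 105x105 cache with bottom-up tabulation by height: a single (N+1)-entry row of counts is rebuilt from the previous height's row, H times.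
-- outside the precondition, e.g. on countOfBST(5, 0): A returns False, B returns False; on countOfBST(-1, 5): A returns 0, B returns 1; on countOfBST(3, -1): A returns 5, B raises RecursionError
import Mathlib
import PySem

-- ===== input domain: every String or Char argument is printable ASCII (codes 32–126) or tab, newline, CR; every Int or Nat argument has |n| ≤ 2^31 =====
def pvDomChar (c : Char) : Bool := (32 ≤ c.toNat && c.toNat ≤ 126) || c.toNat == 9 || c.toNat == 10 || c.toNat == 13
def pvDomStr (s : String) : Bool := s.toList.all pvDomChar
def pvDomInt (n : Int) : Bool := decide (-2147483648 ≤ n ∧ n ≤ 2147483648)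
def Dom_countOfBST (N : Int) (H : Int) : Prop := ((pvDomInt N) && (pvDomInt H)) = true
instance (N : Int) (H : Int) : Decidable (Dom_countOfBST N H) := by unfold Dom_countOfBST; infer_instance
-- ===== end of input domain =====

-- B replaces A's top-down memoized recursion by bottom-up row tabulation (objective: alternative);
-- A's global memo table is modelled per call (a fresh table each top-level call).

-- ===== PORT A =====
-- A's global dp = 105×105 table of -1 is modelled per top-level call and threaded through the
-- recursion; the fuel argument only makes the recursion (which strictly decreases N) structural.
-- dp[N][H]: inside Pre_ both indices are nonnegative and in range, so .toNat / the getD defaults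
-- are only reached outside Pre_ (where the Python wraps a negative index or raises IndexError).
def cobAF : Nat → Array (Array Int) → Int → Int → Int × Array (Array Int)
  | 0, dp, _, _ => (0, dp)
  | f+1, dp, N, H =>
    if N = 0 then (1, dp)
    else if H = 0 then ((if N = 1 then (1 : Int) else 0), dp)
    else if ((dp.getD N.toNat #[]).getD H.toNat (-1)) ≠ -1 then
      (((dp.getD N.toNat #[]).getD H.toNat (-1)), dp)
    else
      let r := (PySem.List.pyRange 1 (N + 1) 1).foldl
        (fun st i =>
          let lf := cobAF f st.2 (i - 1) (H - 1)
          let rg := cobAF f lf.2 (N - i) (H - 1)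
          ((st.1 + (lf.1 * rg.1) % 1000000007) % 1000000007, rg.2))
        ((0 : Int), dp)
      (r.1, r.2.setIfInBounds N.toNat ((r.2.getD N.toNat #[]).setIfInBounds H.toNat r.1))

def countOfBST (N : Int) (H : Int) : Int :=
  (cobAF (N.toNat + 1) (Array.replicate 105 (Array.replicate 105 (-1))) N H).1

-- ===== PORT B =====
-- Source B's row(h) recursion diverges for h < 0 (RecursionError); the Nat argument H.toNat
-- reaches that case only outside Pre_ (where nothing is claimed).
def rowB (N : Int) : Nat → List Int
  | 0 => [1, 1] ++ List.replicate (N - 1).toNat 0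
  | h+1 =>
      let prev := rowB N h
      [1] ++ (PySem.List.pyRange 1 (N + 1) 1).map (fun n =>
        ((PySem.List.pyRange 1 (n + 1) 1).foldl
          (fun s i => s + PySem.List.pyGetD prev (i - 1) 0 * PySem.List.pyGetD prev (n - i) 0) 0)
        % 1000000007)

def countOfBST_alt (N : Int) (H : Int) : Int :=
  if N = 0 then 1
  else if H = 0 then (if N = 1 then 1 else 0)
  else PySem.List.pyGetD (rowB N H.toNat) N 0

-- ===== PRECONDITION & SPEC =====
-- Pre_ excludes (a) the H=0, N≠0 line, where A returns a Python bool (N == 1), not an int;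
-- (b) N>104 or H>104 off the early-return lines, where A raises IndexError from its fixed-size
-- global table; and (c) negative N or negative H off those lines, where A reads/writes its global
-- memo at wrapped negative indices, so its value depends on the history of earlier calls.
def Pre_countOfBST (N : Int) (H : Int) : Prop :=
  N = 0 ∨ (1 ≤ N ∧ N ≤ 104 ∧ 1 ≤ H ∧ H ≤ 104)
instance (N : Int) (H : Int) : Decidable (Pre_countOfBST N H) := by unfold Pre_countOfBST; infer_instance
def pvWitness_countOfBST : Int × Int := (3, 2)

def Spec_countOfBST (N : Int) (H : Int) (out : Int) : Prop := out = countOfBST_alt N H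
instance (N : Int) (H : Int) (out : Int) : Decidable (Spec_countOfBST N H out) := by unfold Spec_countOfBST; infer_instance

-- ===== CLAIM (what is proved, stated in full; the proofs are below) =====
def Claim_equal_countOfBST : Prop := ∀ (N : Int) (H : Int), Dom_countOfBST N H → Pre_countOfBST N H → Spec_countOfBST N H (countOfBST N H)

-- ===== LEMMAS AND PROOFS =====

-- Pure (memo-free) fueled form of A's recurrence; the reference both ports are related to.
def pureF : Nat → Int → Int → Int
  | 0, _, _ => 0
  | f+1, N, H =>
    if N = 0 then 1
    else if H = 0 then (if N = 1 then 1 else 0)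
    else (PySem.List.pyRange 1 (N + 1) 1).foldl
      (fun s i => (s + (pureF f (i - 1) (H - 1) * pureF f (N - i) (H - 1)) % 1000000007) % 1000000007) 0

theorem pureF_mono : ∀ f g : Nat, ∀ N H : Int, N.toNat < f → N.toNat < g →
    pureF f N H = pureF g N H := by
  intro f
  induction f with
  | zero => intro g N H hf hg; exact absurd hf (Nat.not_lt_zero _)
  | succ f ih =>
      intro g N H hf hg
      obtain ⟨g, rfl⟩ : ∃ g', g = g' + 1 := ⟨g - 1, by omega⟩
      simp only [pureF]
      split_ifs with h1 h2 h3
      · rfl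
      · rfl
      · rfl
      · apply PySem.List.foldl_congr_mem'
        intro i hi s
        have hib := (PySem.List.mem_pyRange_one).1 hi
        have e1 : pureF f (i - 1) (H - 1) = pureF g (i - 1) (H - 1) :=
          ih g (i - 1) (H - 1) (by omega) (by omega)
        have e2 : pureF f (N - i) (H - 1) = pureF g (N - i) (H - 1) :=
          ih g (N - i) (H - 1) (by omega) (by omega)
        rw [e1, e2]

-- canonical value
def pureC (N H : Int) : Int := pureF (N.toNat + 1) N H

theorem pureC_eq_pureF (f : Nat) (N H : Int) (hf : N.toNat < f) : pureF f N H = pureC N H :=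
  pureF_mono f (N.toNat + 1) N H hf (Nat.lt_succ_self _)

-- array-table access lemmas (proof helpers)
theorem arr_getD_set {α : Type} (a : Array α) (i j : Nat) (v d : α) :
    (a.setIfInBounds i v).getD j d = if i = j ∧ i < a.size then v else a.getD j d := by
  rw [Array.getD_eq_getD_getElem?, Array.getElem?_setIfInBounds]
  by_cases h1 : i = j
  · subst h1
    by_cases h2 : i < a.size
    · simp [h2]
    · simp [h2, Array.getD_eq_getD_getElem?]
  · simp [h1, Array.getD_eq_getD_getElem?]

theorem arr_getD_replicate {α : Type} (n : Nat) (x : α) (i : Nat) (d : α) :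
    (Array.replicate n x).getD i d = if i < n then x else d := by
  rw [Array.getD_eq_getD_getElem?, Array.getElem?_replicate]
  split_ifs <;> rfl

-- reading A's memo table
def rd (dp : Array (Array Int)) (n h : Nat) : Int := (dp.getD n #[]).getD h (-1)

-- the threaded memo is well-formed and every set entry holds the pure value
def Coh (dp : Array (Array Int)) : Prop :=
  dp.size = 105 ∧ (∀ i : Nat, i < 105 → (dp.getD i #[]).size = 105) ∧
  (∀ n h : Nat, rd dp n h ≠ -1 → rd dp n h = pureC (n : Int) (h : Int))

theorem coh_init : Coh (Array.replicate 105 (Array.replicate 105 (-1))) := by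
  refine ⟨Array.size_replicate, ?_, ?_⟩
  · intro i hi
    rw [arr_getD_replicate, if_pos hi, Array.size_replicate]
  · intro n h hne
    exfalso
    apply hne
    unfold rd
    rw [arr_getD_replicate]
    by_cases hn : n < 105
    · rw [if_pos hn, arr_getD_replicate]
      split_ifs <;> rfl
    · rw [if_neg hn]
      simp [Array.getD]

theorem rd_write (dp : Array (Array Int)) (hs : dp.size = 105)
    (hin : ∀ i : Nat, i < 105 → (dp.getD i #[]).size = 105)
    (n₀ h₀ : Nat) (v : Int) (n h : Nat) :
    rd (dp.setIfInBounds n₀ ((dp.getD n₀ #[]).setIfInBounds h₀ v)) n h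
      = if n₀ = n ∧ h₀ = h ∧ n₀ < 105 ∧ h₀ < 105 then v else rd dp n h := by
  unfold rd
  rw [arr_getD_set]
  by_cases h1 : n₀ = n ∧ n₀ < dp.size
  · rw [if_pos h1]
    obtain ⟨e, hlt⟩ := h1
    subst e
    have hsize : (dp.getD n₀ #[]).size = 105 := hin n₀ (by omega)
    rw [arr_getD_set, hsize]
    by_cases h2 : h₀ = h ∧ h₀ < 105
    · rw [if_pos h2, if_pos ⟨rfl, h2.1, by omega, h2.2⟩]
    · rw [if_neg h2, if_neg (fun c => h2 ⟨c.2.1, c.2.2.2⟩)]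
  · rw [if_neg h1, if_neg (fun c => h1 ⟨c.1, by omega⟩)]

-- named forms of A's loop body and its pure counterpart (proof helpers only)
def stepA (f : Nat) (N H : Int) (st : Int × Array (Array Int)) (i : Int) :
    Int × Array (Array Int) :=
  let lf := cobAF f st.2 (i - 1) (H - 1)
  let rg := cobAF f lf.2 (N - i) (H - 1)
  ((st.1 + (lf.1 * rg.1) % 1000000007) % 1000000007, rg.2)

def stepP (N H : Int) (s : Int) (i : Int) : Int :=
  (s + (pureC (i - 1) (H - 1) * pureC (N - i) (H - 1)) % 1000000007) % 1000000007

theorem cobA_loop (f : Nat) (N H : Int) (hf : N.toNat ≤ f) (hH : 1 ≤ H)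
    (ih : ∀ (dp : Array (Array Int)) (N' H' : Int), 0 ≤ N' → 0 ≤ H' → N'.toNat < f → Coh dp →
      (cobAF f dp N' H').1 = pureC N' H' ∧ Coh (cobAF f dp N' H').2) :
    ∀ l : List Int, (∀ i ∈ l, 1 ≤ i ∧ i ≤ N) →
      ∀ (s : Int) (d : Array (Array Int)), Coh d →
        (l.foldl (stepA f N H) (s, d)).1 = l.foldl (stepP N H) s
        ∧ Coh (l.foldl (stepA f N H) (s, d)).2 := by
  intro l
  induction l with
  | nil => intro _ s d hd; exact ⟨rfl, hd⟩
  | cons i t iht =>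
      intro hmem s d hd
      obtain ⟨hi1, hi2⟩ := hmem i (by simp)
      obtain ⟨e1, c1⟩ := ih d (i - 1) (H - 1) (by omega) (by omega) (by omega) hd
      obtain ⟨e2, c2⟩ := ih (cobAF f d (i - 1) (H - 1)).2 (N - i) (H - 1)
        (by omega) (by omega) (by omega) c1
      simp only [List.foldl_cons]
      have hstep : stepA f N H (s, d) i
          = (stepP N H s i,
             (cobAF f (cobAF f d (i - 1) (H - 1)).2 (N - i) (H - 1)).2) := by
        simp only [stepA, stepP]
        rw [e1, e2]
      rw [hstep]
      exact iht (fun j hj => hmem j (List.mem_cons_of_mem _ hj)) _ _ c2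

theorem cobAF_eq_pureC : ∀ f : Nat, ∀ dp N H, 0 ≤ N → 0 ≤ H → N.toNat < f → Coh dp →
    (cobAF f dp N H).1 = pureC N H ∧ Coh (cobAF f dp N H).2 := by
  intro f
  induction f with
  | zero => intro dp N H hN hH hf hcoh; exact absurd hf (Nat.not_lt_zero _)
  | succ f ih =>
      intro dp N H hN hH hf hcoh
      by_cases h1 : N = 0
      · subst h1
        exact ⟨by simp [cobAF, pureC, pureF], by simpa [cobAF] using hcoh⟩
      · by_cases h2 : H = 0
        · subst h2
          refine ⟨?_, by simpa [cobAF, h1] using hcoh⟩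
          simp [cobAF, h1, pureC, pureF]
        · by_cases h3 : ((dp.getD N.toNat #[]).getD H.toNat (-1)) ≠ -1
          · refine ⟨?_, by simp only [cobAF, if_neg h1, if_neg h2, if_pos h3]; exact hcoh⟩
            simp only [cobAF, if_neg h1, if_neg h2, if_pos h3]
            have := hcoh.2.2 N.toNat H.toNat h3
            rwa [Int.toNat_of_nonneg hN, Int.toNat_of_nonneg hH] at this
          · -- the loop branch
            have hmem : ∀ i ∈ PySem.List.pyRange 1 (N + 1) 1, 1 ≤ i ∧ i ≤ N := by
              intro i hi
              have := PySem.List.mem_pyRange_one.1 hi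
              omega
            obtain ⟨hr1, hr2⟩ := cobA_loop f N H (by omega) (by omega) ih
              (PySem.List.pyRange 1 (N + 1) 1) hmem 0 dp hcoh
            have hv : List.foldl (stepP N H) 0 (PySem.List.pyRange 1 (N + 1) 1) = pureC N H := by
              conv_rhs => rw [show pureC N H = pureF (N.toNat + 1) N H from rfl]
              rw [show pureF (N.toNat + 1) N H
                  = (if N = 0 then 1 else if H = 0 then (if N = 1 then 1 else 0)
                     else (PySem.List.pyRange 1 (N + 1) 1).foldl
                       (fun s i => (s + (pureF N.toNat (i - 1) (H - 1) * pureF N.toNat (N - i) (H - 1))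
                          % 1000000007) % 1000000007) 0)
                  from by simp only [pureF]]
              rw [if_neg h1, if_neg h2]
              apply PySem.List.foldl_congr_mem'
              intro i hi s
              have hib := PySem.List.mem_pyRange_one.1 hi
              simp only [stepP]
              rw [pureC_eq_pureF N.toNat (i - 1) (H - 1) (by omega),
                  pureC_eq_pureF N.toNat (N - i) (H - 1) (by omega)]
            have hunf : cobAF (f + 1) dp N H
                = ((List.foldl (stepA f N H) (0, dp) (PySem.List.pyRange 1 (N + 1) 1)).1,
                   (List.foldl (stepA f N H) (0, dp) (PySem.List.pyRange 1 (N + 1) 1)).2.setIfInBounds N.toNat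
                     (((List.foldl (stepA f N H) (0, dp) (PySem.List.pyRange 1 (N + 1) 1)).2.getD N.toNat #[]).setIfInBounds H.toNat
                       (List.foldl (stepA f N H) (0, dp) (PySem.List.pyRange 1 (N + 1) 1)).1)) := by
              simp only [cobAF, if_neg h1, if_neg h2, if_neg h3]
              rfl
            obtain ⟨hsz, hinn, hent⟩ := hr2
            refine ⟨?_, ?_⟩
            · rw [hunf]
              exact hr1.trans hv
            · rw [hunf]
              refine ⟨?_, ?_, ?_⟩
              · rw [Array.size_setIfInBounds]
                exact hsz
              · intro i hilt
                rw [arr_getD_set]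
                by_cases hc : N.toNat = i ∧ N.toNat < (List.foldl (stepA f N H) (0, dp) (PySem.List.pyRange 1 (N + 1) 1)).2.size
                · rw [if_pos hc, Array.size_setIfInBounds]
                  exact hinn N.toNat (by omega)
                · rw [if_neg hc]
                  exact hinn i hilt
              · intro n h hne
                rw [rd_write _ hsz hinn] at hne ⊢
                split_ifs at hne ⊢ with he
                · obtain ⟨eN, eH, _, _⟩ := he
                  rw [hr1, hv, ← eN, ← eH, Int.toNat_of_nonneg hN, Int.toNat_of_nonneg hH]
                · exact hent n h hne

theorem countOfBST_eq_pureC (N H : Int) (hN : 0 ≤ N) (hH : 0 ≤ H) :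
    countOfBST N H = pureC N H :=
  (cobAF_eq_pureC (N.toNat + 1) (Array.replicate 105 (Array.replicate 105 (-1))) N H
    hN hH (Nat.lt_succ_self _) coh_init).1

theorem pureC_zero_nodes (H : Int) : pureC 0 H = 1 := by
  simp [pureC, pureF]

theorem pureC_zero_height (n : Nat) : pureC (n : Int) 0 = if n ≤ 1 then 1 else 0 := by
  match n with
  | 0 => simp [pureC, pureF]
  | Nat.succ m =>
      simp only [pureC, pureF, Int.toNat_natCast]
      split_ifs <;> omega

-- the row of values B tabulates: counts for 0..N nodes at a fixed height bound
def rowP (N : Int) (t : Nat) : List Int :=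
  (List.range (N.toNat + 1)).map (fun (k : Nat) => pureC (k : Int) (t : Int))

theorem pyGetD_rowP (N : Int) (t : Nat) (j : Int) (h0 : 0 ≤ j) (h1 : j ≤ N) :
    PySem.List.pyGetD (rowP N t) j 0 = pureC j (t : Int) := by
  have hj : j = ((j.toNat : Nat) : Int) := (Int.toNat_of_nonneg h0).symm
  rw [hj, PySem.List.pyGetD_natCast, rowP,
      PySem.List.getD_map_range _ _ _ _ (by omega)]

theorem row0_eq (N : Int) (hN : 1 ≤ N) :
    ([1, 1] ++ List.replicate (N - 1).toNat 0 : List Int) = rowP N 0 := by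
  apply List.ext_getElem
  · simp [rowP]; omega
  · intro k h1k h2k
    simp only [rowP, List.getElem_map, List.getElem_range, Nat.cast_zero]
    rw [pureC_zero_height k]
    match k with
    | 0 => simp
    | 1 => simp
    | (m+2) =>
        rw [if_neg (by omega)]
        have hlt : m < (N - 1).toNat := by
          simp at h1k
          omega
        simp [List.getElem_replicate]

theorem foldl_sum_mod (l : List Int) (g : Int → Int) :
    ∀ s : Int, l.foldl (fun s i => (s + g i % 1000000007) % 1000000007) (s % 1000000007)
      = (l.foldl (fun s i => s + g i) s) % 1000000007 := by
  induction l with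
  | nil => intro s; rfl
  | cons x t ih =>
      intro s
      simp only [List.foldl_cons]
      rw [show (s % 1000000007 + g x % 1000000007) % 1000000007 = (s + g x) % 1000000007
          from (Int.add_emod s (g x) 1000000007).symm]
      exact ih (s + g x)

theorem inner_sum_eq (N : Int) (t : Nat) (n : Int) (hn1 : 1 ≤ n) (hn2 : n ≤ N) :
    ((PySem.List.pyRange 1 (n + 1) 1).foldl
        (fun s i => s + PySem.List.pyGetD (rowP N t) (i - 1) 0 * PySem.List.pyGetD (rowP N t) (n - i) 0) 0)
      % 1000000007 = pureC n ((t : Int) + 1) := by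
  have step1 : (PySem.List.pyRange 1 (n + 1) 1).foldl
      (fun s i => s + PySem.List.pyGetD (rowP N t) (i - 1) 0 * PySem.List.pyGetD (rowP N t) (n - i) 0) 0
      = (PySem.List.pyRange 1 (n + 1) 1).foldl
          (fun s i => s + pureC (i - 1) (t : Int) * pureC (n - i) (t : Int)) 0 := by
    apply PySem.List.foldl_congr_mem'
    intro i hi s
    have hib := PySem.List.mem_pyRange_one.1 hi
    rw [pyGetD_rowP N t (i - 1) (by omega) (by omega),
        pyGetD_rowP N t (n - i) (by omega) (by omega)]
  rw [step1]
  have step2 := foldl_sum_mod (PySem.List.pyRange 1 (n + 1) 1)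
      (fun i => pureC (i - 1) (t : Int) * pureC (n - i) (t : Int)) 0
  rw [Int.zero_emod] at step2
  rw [← step2]
  -- now show the per-step-mod fold is pureC n (t+1)
  conv_rhs => rw [show pureC n ((t : Int) + 1) = pureF (n.toNat + 1) n ((t : Int) + 1) from rfl]
  rw [show pureF (n.toNat + 1) n ((t : Int) + 1)
      = (if n = 0 then 1 else if (t : Int) + 1 = 0 then (if n = 1 then 1 else 0)
         else (PySem.List.pyRange 1 (n + 1) 1).foldl
           (fun s i => (s + (pureF n.toNat (i - 1) ((t : Int) + 1 - 1) * pureF n.toNat (n - i) ((t : Int) + 1 - 1))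
              % 1000000007) % 1000000007) 0)
      from by simp only [pureF]]
  rw [if_neg (by omega), if_neg (by omega)]
  apply PySem.List.foldl_congr_mem'
  intro i hi s
  have hib := PySem.List.mem_pyRange_one.1 hi
  rw [show (t : Int) + 1 - 1 = (t : Int) from by ring,
      pureC_eq_pureF n.toNat (i - 1) (t : Int) (by omega),
      pureC_eq_pureF n.toNat (n - i) (t : Int) (by omega)]

theorem stepB_row (N : Int) (hN : 1 ≤ N) (t : Nat) :
    ([1] ++ (PySem.List.pyRange 1 (N + 1) 1).map (fun n =>
        ((PySem.List.pyRange 1 (n + 1) 1).foldl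
          (fun s i => s + PySem.List.pyGetD (rowP N t) (i - 1) 0 * PySem.List.pyGetD (rowP N t) (n - i) 0) 0)
        % 1000000007))
      = rowP N (t + 1) := by
  conv_rhs => rw [rowP, List.range_succ_eq_map]
  rw [PySem.List.pyRange_one 1 (N + 1)]
  simp only [List.map_cons, List.map_map]
  have hlen : (N + 1 - 1).toNat = N.toNat := by omega
  rw [hlen]
  refine List.cons_eq_cons.mpr ⟨by simp [pureC_zero_nodes], ?_⟩
  apply List.map_congr_left
  intro k hk
  have hk' : k < N.toNat := List.mem_range.mp hk
  simp only [Function.comp_apply]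
  rw [inner_sum_eq N t (1 + (k : Int)) (by omega) (by omega)]
  congr 1 <;> (push_cast; ring)

theorem rowB_eq (N : Int) (hN : 1 ≤ N) : ∀ m : Nat, rowB N m = rowP N m := by
  intro m
  induction m with
  | zero => simpa [rowB] using row0_eq N hN
  | succ m ih =>
      rw [rowB, ih]
      exact stepB_row N hN m

theorem alt_eq_pureC (N H : Int) (hN : 1 ≤ N) (hH : 1 ≤ H) :
    countOfBST_alt N H = pureC N H := by
  unfold countOfBST_alt
  rw [if_neg (by omega : ¬N = 0), if_neg (by omega : ¬H = 0),
      rowB_eq N hN H.toNat, pyGetD_rowP N H.toNat N (by omega) le_rfl,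
      Int.toNat_of_nonneg (by omega : (0:Int) ≤ H)]

-- ===== VERDICT (by name: the statement is the Claim_ definition above) =====
theorem countOfBST_spec : Claim_equal_countOfBST := by
  intro N H _ hpre
  unfold Spec_countOfBST
  rcases hpre with h0 | ⟨h1, h2, h3, h4⟩
  · subst h0
    simp [countOfBST, cobAF, countOfBST_alt]
  · rw [countOfBST_eq_pureC N H (by omega) (by omega), alt_eq_pureC N H h1 h3]
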